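-- pv_equiv track=rewrite | github.com/viktor-edward/AdventOfCode2021 | src/day4.py | createBingoMatrices
-- ===== SOURCE A (Python) =====
-- bingoSize = 5
--
-- def createBingoMatrices(data):
--     i = 0
--     bingoMatrices = []
--     tempMatrix = []
--     for row in data:
--         tempMatrix.append(row)
--         if i == bingoSize - 1:
--             i = 0
--             bingoMatrices.append(tempMatrix)
--             tempMatrix = []
--         else:
--             i += 1
--     return bingoMatrices
-- ===== SOURCE B (Python) =====
-- bingoSize = 5
--
-- def createBingoMatrices(data):
--     return [data[i:i + bingoSize] for i in range(0, (len(data) // bingoSize) * bingoSize, bingoSize)]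
-- ===== Notes on version B (the rewrite author's own statement) =====
-- stated objective: idiomatic
-- what changed: Replaced the counter/temp-accumulator loop by a one-line slicing comprehension over stride-5 start indices, with a floor-division bound that drops the trailing incomplete group.
import Mathlib
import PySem

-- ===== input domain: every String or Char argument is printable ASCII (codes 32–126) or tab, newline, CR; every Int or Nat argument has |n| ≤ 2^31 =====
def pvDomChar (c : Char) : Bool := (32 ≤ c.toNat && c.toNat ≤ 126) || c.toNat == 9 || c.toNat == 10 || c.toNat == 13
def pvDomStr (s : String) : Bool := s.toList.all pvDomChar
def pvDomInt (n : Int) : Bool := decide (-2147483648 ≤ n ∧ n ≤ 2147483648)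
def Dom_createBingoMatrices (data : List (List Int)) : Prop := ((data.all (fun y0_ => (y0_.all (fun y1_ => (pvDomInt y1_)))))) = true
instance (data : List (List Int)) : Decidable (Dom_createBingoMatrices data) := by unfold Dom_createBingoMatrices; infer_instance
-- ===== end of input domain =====

-- ===== PORT A =====
-- B replaces A's counter/temp-accumulator loop by a slicing comprehension over stride-5 start indices (idiomatic; same cost).
def bingoSize : Int := 5

def createBingoMatrices (data : List (List Int)) : List (List (List Int)) :=
  (data.foldl
    (fun (st : Int × List (List (List Int)) × List (List Int)) row =>
      let tempMatrix := st.2.2 ++ [row]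
      if st.1 == bingoSize - 1 then (0, st.2.1 ++ [tempMatrix], ([] : List (List Int)))
      else (st.1 + 1, st.2.1, tempMatrix))
    (0, [], [])).2.1

-- ===== PORT B =====
def createBingoMatrices_alt (data : List (List Int)) : List (List (List Int)) :=
  (PySem.List.pyRange 0 (PySem.Int.floordiv (data.length : Int) bingoSize * bingoSize) bingoSize).map
    (fun i => PySem.List.slice data (some i) (some (i + bingoSize)))

-- ===== PRECONDITION & SPEC =====
def Spec_createBingoMatrices (data : List (List Int)) (out : List (List (List Int))) : Prop := out = createBingoMatrices_alt data
instance (data : List (List Int)) (out : List (List (List Int))) : Decidable (Spec_createBingoMatrices data out) := by unfold Spec_createBingoMatrices; infer_instance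

-- ===== CLAIM (what is proved, stated in full; the proofs are below) =====
def Claim_equal_createBingoMatrices : Prop := ∀ (data : List (List Int)), Dom_createBingoMatrices data → Spec_createBingoMatrices data (createBingoMatrices data)

-- ===== LEMMAS AND PROOFS =====
-- reference chunking used only by the proofs
def chunks5 {α : Type} : List α → List (List α)
  | a :: b :: c :: d :: e :: rest => [a, b, c, d, e] :: chunks5 rest
  | _ => []

theorem loopA_eq_chunks5 (data : List (List Int)) (mats : List (List (List Int))) :
    (data.foldl
      (fun (st : Int × List (List (List Int)) × List (List Int)) row =>
        let tempMatrix := st.2.2 ++ [row]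
        if st.1 == bingoSize - 1 then (0, st.2.1 ++ [tempMatrix], ([] : List (List Int)))
        else (st.1 + 1, st.2.1, tempMatrix))
      (0, mats, [])).2.1 = mats ++ chunks5 data := by
  induction data using chunks5.induct generalizing mats with
  | case1 a b c d e rest ih =>
      simp only [bingoSize] at ih ⊢
      simp only [List.foldl]
      norm_num at ih ⊢
      rw [ih, chunks5]
      simp
  | case2 data h =>
      match data, h with
      | [], _ => simp [chunks5]
      | [a], _ => simp [List.foldl, bingoSize, chunks5]
      | [a, b], _ => simp [List.foldl, bingoSize, chunks5]
      | [a, b, c], _ => simp [List.foldl, bingoSize, chunks5]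
      | [a, b, c, d], _ => simp [List.foldl, bingoSize, chunks5]
      | a :: b :: c :: d :: e :: rest, h => exact (h a b c d e rest rfl).elim

theorem chunks5_take_drop {α : Type} (data : List α) :
    (List.range (data.length / 5)).map (fun k => (data.drop (5 * k)).take 5) = chunks5 data := by
  induction data using chunks5.induct with
  | case1 a b c d e rest ih =>
      have hlen : (a :: b :: c :: d :: e :: rest).length / 5 = rest.length / 5 + 1 := by
        simp [List.length_cons]; omega
      rw [hlen, List.range_succ_eq_map, List.map_cons, List.map_map]
      have hmap : ∀ k : ℕ,
          (((a :: b :: c :: d :: e :: rest).drop (5 * (k + 1))).take 5) = ((rest.drop (5 * k)).take 5) := by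
        intro k
        have h5 : 5 * (k + 1) = 5 + 5 * k := by ring
        rw [h5, ← List.drop_drop]
        rfl
      calc ((a :: b :: c :: d :: e :: rest).drop (5 * 0)).take 5 ::
            (List.range (rest.length / 5)).map
              ((fun k => ((a :: b :: c :: d :: e :: rest).drop (5 * k)).take 5) ∘ Nat.succ)
          = [a, b, c, d, e] :: (List.range (rest.length / 5)).map (fun k => (rest.drop (5 * k)).take 5) := by
            refine congrArg₂ List.cons rfl ?_
            refine List.map_congr_left fun k _ => ?_
            simpa [Function.comp, Nat.succ_eq_add_one] using hmap k
        _ = chunks5 (a :: b :: c :: d :: e :: rest) := by rw [ih, chunks5]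
  | case2 data h =>
      match data, h with
      | [], _ => simp [chunks5]
      | [a], _ => simp [chunks5]
      | [a, b], _ => simp [chunks5]
      | [a, b, c], _ => simp [chunks5]
      | [a, b, c, d], _ => simp [chunks5]
      | a :: b :: c :: d :: e :: rest, h => exact (h a b c d e rest rfl).elim

theorem altB_eq_chunks5 (data : List (List Int)) : createBingoMatrices_alt data = chunks5 data := by
  unfold createBingoMatrices_alt bingoSize
  have hn : PySem.Int.floordiv (data.length : ℤ) 5 = ((data.length / 5 : ℕ) : ℤ) := by
    exact_mod_cast PySem.Int.floordiv_natCast data.length 5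
  rw [hn, PySem.List.pyRange_of_pos _ _ (by norm_num)]
  have hcnt : (if (0:ℤ) < ((data.length / 5 : ℕ) : ℤ) * 5 then
      ((((data.length / 5 : ℕ) : ℤ) * 5 - 0 + 5 - 1) / 5).toNat else 0) = data.length / 5 := by
    by_cases hm : data.length / 5 = 0
    · simp [hm]
    · rw [if_pos (by omega)]
      omega
  rw [hcnt, ← chunks5_take_drop data, List.map_map]
  refine List.map_congr_left fun k _ => ?_
  simp only [Function.comp]
  rw [show ((0:ℤ) + 5 * (k:ℤ) + 5) = ((5 * k : ℕ) : ℤ) + ((5:ℕ) : ℤ) by omega,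
      show ((0:ℤ) + 5 * (k:ℤ)) = ((5 * k : ℕ) : ℤ) by omega]
  exact PySem.List.slice_natCast_add data (5 * k) 5

-- ===== VERDICT (by name: the statement is the Claim_ definition above) =====
theorem createBingoMatrices_spec : Claim_equal_createBingoMatrices := by
  intro data _
  unfold Spec_createBingoMatrices
  rw [altB_eq_chunks5]
  unfold createBingoMatrices
  rw [loopA_eq_chunks5]
  simp
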